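-- pv_equiv track=rewrite | github.com/satwik6941/ASEB-seating-arrangement | pand_seating.py | print_classroom_details
-- ===== SOURCE A (Python) =====
-- def print_classroom_details(classrooms_content, student_year_lists):
--     course_year_to_classrooms = {}
--     for course_year, students_list in student_year_lists.items():
--         for classroom, studs in classrooms_content.items():
--             intersection = sorted(set(studs) & set(students_list))
--             if intersection:
--                 if course_year not in course_year_to_classrooms:
--                     course_year_to_classrooms[course_year] = {}
--                 course_year_to_classrooms[course_year][classroom] = intersection
--     return course_year_to_classrooms
-- ===== SOURCE B (Python) =====
-- def print_classroom_details(classrooms_content, student_year_lists):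
--     # Inverted index built once: student -> classrooms containing them (in classroom order).
--     index = {}
--     for classroom, studs in classrooms_content.items():
--         for s in dict.fromkeys(studs):
--             index.setdefault(s, []).append(classroom)
--     result = {}
--     for course_year, students_list in student_year_lists.items():
--         grouped = {}
--         for s in dict.fromkeys(students_list):
--             for c in index.get(s, []):
--                 grouped.setdefault(c, []).append(s)
--         if grouped:
--             result[course_year] = {c: sorted(grouped[c])
--                                    for c in classrooms_content if c in grouped}
--     return result
-- ===== Notes on version B (the rewrite author's own statement) =====
-- stated objective: faster
-- what changed: Instead of computing sorted(set(studs) & set(students_list)) for every year x classroom pair, B builds a student-to-classrooms inverted index over classrooms_content once and groups each year's (deduplicated) students by direct lookup, emitting each year's classrooms in classroom order.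
import Mathlib
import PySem

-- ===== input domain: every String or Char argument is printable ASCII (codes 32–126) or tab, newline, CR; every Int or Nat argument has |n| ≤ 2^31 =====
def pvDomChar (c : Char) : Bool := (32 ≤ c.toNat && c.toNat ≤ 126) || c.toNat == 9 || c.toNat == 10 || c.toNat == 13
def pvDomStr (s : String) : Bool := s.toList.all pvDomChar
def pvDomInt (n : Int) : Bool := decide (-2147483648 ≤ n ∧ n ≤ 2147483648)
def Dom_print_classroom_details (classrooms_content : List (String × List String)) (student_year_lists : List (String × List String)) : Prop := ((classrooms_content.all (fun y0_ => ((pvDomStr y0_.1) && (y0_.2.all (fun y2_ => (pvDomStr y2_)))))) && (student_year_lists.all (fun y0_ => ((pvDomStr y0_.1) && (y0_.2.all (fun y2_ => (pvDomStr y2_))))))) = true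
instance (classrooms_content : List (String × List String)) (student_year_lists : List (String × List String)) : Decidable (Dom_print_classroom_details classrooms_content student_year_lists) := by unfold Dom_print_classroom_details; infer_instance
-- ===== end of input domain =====

-- B replaces A's year×classroom re-intersection (a set intersection per pair) by a student→classrooms
-- inverted index built once, grouping each year's students by lookup; return values proved equal.

-- ===== PORT A =====
-- sorted(set(studs) & set(students_list))
def interA (studs sl : List String) : List String :=
  PySem.List.sorted (PySem.Set.inter (PySem.Set.ofList studs) (PySem.Set.ofList sl)) (fun x => x)

-- body of A's inner loop over classrooms_content.items(), for the current course_year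
def stepA (cy : String) (sl : List String)
    (acc : PySem.Dict String (PySem.Dict String (List String))) (p : String × List String) :
    PySem.Dict String (PySem.Dict String (List String)) :=
  let inter := interA p.2 sl
  if inter ≠ [] then
    let acc1 := if acc.contains cy then acc else acc.insert cy PySem.Dict.empty
    acc1.insert cy ((acc1.getD cy PySem.Dict.empty).insert p.1 inter)
  else acc

def print_classroom_details (classrooms_content : List (String × List String)) (student_year_lists : List (String × List String)) : List (String × List (String × List String)) :=
  let cls := (PySem.Dict.ofList classrooms_content).items
  (((PySem.Dict.ofList student_year_lists).items).foldl
      (fun acc q => cls.foldl (stepA q.1 q.2) acc) PySem.Dict.empty).items.map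
    (fun p => (p.1, p.2.items))

-- ===== PORT B =====
-- index = {}; for classroom, studs: for s in dict.fromkeys(studs): index.setdefault(s, []).append(classroom)
def invIndex (cls : List (String × List String)) : PySem.Dict String (List String) :=
  cls.foldl (fun d p => (PySem.List.dedup p.2).foldl (fun d s => d.modify s [] (· ++ [p.1])) d)
    PySem.Dict.empty

-- grouped = {}; for s in dict.fromkeys(students_list): for c in index.get(s, []): grouped.setdefault(c, []).append(s)
def groupedB (index : PySem.Dict String (List String)) (sl : List String) : PySem.Dict String (List String) :=
  (PySem.List.dedup sl).foldl
    (fun g s => (index.getD s []).foldl (fun g c => g.modify c [] (· ++ [s])) g)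
    PySem.Dict.empty

def print_classroom_details_alt (classrooms_content : List (String × List String)) (student_year_lists : List (String × List String)) : List (String × List (String × List String)) :=
  let ccd := PySem.Dict.ofList classrooms_content
  let index := invIndex ccd.items
  (((PySem.Dict.ofList student_year_lists).items).foldl
      (fun res q =>
        let grouped := groupedB index q.2
        if grouped.items ≠ [] then
          res.insert q.1
            (ccd.keys.foldl
              (fun d c =>
                if grouped.contains c then
                  d.insert c (PySem.List.sorted (grouped.getD c []) (fun x => x))
                else d)
              PySem.Dict.empty)
        else res)
      PySem.Dict.empty).items.map
    (fun p => (p.1, p.2.items))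

-- ===== PRECONDITION & SPEC =====
def Spec_print_classroom_details (classrooms_content : List (String × List String)) (student_year_lists : List (String × List String)) (out : List (String × List (String × List String))) : Prop := out = print_classroom_details_alt classrooms_content student_year_lists
instance (classrooms_content : List (String × List String)) (student_year_lists : List (String × List String)) (out : List (String × List (String × List String))) : Decidable (Spec_print_classroom_details classrooms_content student_year_lists out) := by unfold Spec_print_classroom_details; infer_instance

-- ===== CLAIM (what is proved, stated in full; the proofs are below) =====
def Claim_equal_print_classroom_details : Prop := ∀ (classrooms_content : List (String × List String)) (student_year_lists : List (String × List String)), Dom_print_classroom_details classrooms_content student_year_lists → Spec_print_classroom_details classrooms_content student_year_lists (print_classroom_details classrooms_content student_year_lists)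

-- ===== LEMMAS AND PROOFS =====

-- A's inner dict for one year, as a plain list: classrooms with a nonempty intersection, in order
def LA (cls : List (String × List String)) (sl : List String) : List (String × List String) :=
  (cls.filter (fun p => decide (interA p.2 sl ≠ []))).map (fun p => (p.1, interA p.2 sl))

-- filtering a Nodup list for equality with s
theorem filter_beq_of_nodup (l : List String) (s : String) (h : l.Nodup) :
    l.filter (fun t => t == s) = if s ∈ l then [s] else [] := by
  induction l with
  | nil => simp
  | cons a t ih =>
    simp only [List.nodup_cons] at h
    by_cases ha : a = s
    · subst ha
      have hnil : List.filter (fun t => t == a) t = [] :=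
        List.filter_eq_nil_iff.2 (fun b hb => by
          simp only [beq_iff_eq]; rintro rfl; exact h.1 hb)
      simp [hnil]
    · simp only [List.filter_cons, beq_iff_eq, ha, if_false, List.mem_cons, ih h.2]
      have hiff : (s = a ∨ s ∈ t) ↔ s ∈ t := by
        constructor
        · rintro (rfl | hmem)
          · exact absurd rfl ha
          · exact hmem
        · exact Or.inr
      simp [hiff]

-- the common flatten-then-filter shape of both grouping loops
theorem flat_filter_map {α : Type} (L : List α) (k : α → String) (el : α → List String)
    (hnd : ∀ a ∈ L, (el a).Nodup) (c : String) :
    ((L.flatMap (fun a => (el a).map (fun s => (s, k a)))).filter (fun pr => pr.1 == c)).map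
        (fun pr => pr.2)
      = (L.filter (fun a => decide (c ∈ el a))).map k := by
  induction L with
  | nil => simp
  | cons a t ih =>
    have hrest := ih (fun b hb => hnd b (List.mem_cons_of_mem a hb))
    simp only [List.flatMap_cons, List.filter_append, List.map_append, hrest, List.filter_cons]
    have hhead : ((el a).map (fun s => (s, k a))).filter (fun pr => pr.1 == c)
        = ((el a).filter (fun t => t == c)).map (fun s => (s, k a)) := by
      simp [List.filter_map, Function.comp_def]
    rw [hhead, filter_beq_of_nodup _ _ (hnd a (List.mem_cons_self))]
    by_cases hm : c ∈ el a
    · simp [hm]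
    · simp [hm]

theorem invIndex_getD (cls : List (String × List String)) (s : String) :
    (invIndex cls).getD s [] = (cls.filter (fun p => decide (s ∈ p.2))).map (fun p => p.1) := by
  have hflat : invIndex cls
      = (cls.flatMap (fun p => (PySem.List.dedup p.2).map (fun s => (s, p.1)))).foldl
          (fun d pr => d.modify pr.1 [] (· ++ [pr.2])) PySem.Dict.empty := by
    unfold invIndex
    rw [List.foldl_flatMap]
    simp only [List.foldl_map]
  rw [hflat, PySem.Dict.getD_foldl_modify_append]
  rw [PySem.Dict.getD_empty, List.nil_append]
  rw [flat_filter_map cls Prod.fst (fun p => PySem.List.dedup p.2)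
      (fun a _ => PySem.List.nodup_dedup a.2) s]
  congr 1
  exact List.filter_congr (fun p _ => by simp)

theorem groupedB_getD (index : PySem.Dict String (List String))
    (hnd : ∀ t, (index.getD t []).Nodup) (sl : List String) (c : String) :
    (groupedB index sl).getD c []
      = (PySem.List.dedup sl).filter (fun s => decide (c ∈ index.getD s [])) := by
  have hflat : groupedB index sl
      = ((PySem.List.dedup sl).flatMap (fun s => (index.getD s []).map (fun c => (c, s)))).foldl
          (fun g pr => g.modify pr.1 [] (· ++ [pr.2])) PySem.Dict.empty := by
    unfold groupedB
    rw [List.foldl_flatMap]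
    simp only [List.foldl_map]
  rw [hflat, PySem.Dict.getD_foldl_modify_append]
  rw [PySem.Dict.getD_empty, List.nil_append]
  have h2 := flat_filter_map (PySem.List.dedup sl) (fun s => s) (fun s => index.getD s [])
      (fun a _ => hnd a) c
  simp only [] at h2
  rw [h2, List.map_id']

theorem groupedB_keys (index : PySem.Dict String (List String)) (sl : List String) :
    (groupedB index sl).keys
      = PySem.Set.ofList
          (((PySem.List.dedup sl).flatMap (fun s => (index.getD s []).map (fun c => (c, s)))).map
            (fun pr => pr.1)) := by
  have hflat : groupedB index sl
      = ((PySem.List.dedup sl).flatMap (fun s => (index.getD s []).map (fun c => (c, s)))).foldl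
          (fun g pr => g.modify pr.1 [] (· ++ [pr.2])) PySem.Dict.empty := by
    unfold groupedB
    rw [List.foldl_flatMap]
    simp only [List.foldl_map]
  rw [hflat]
  rw [PySem.Dict.keys_foldl_modify_key _ Prod.fst [] (fun _ pr => (· ++ [pr.2]))]
  rw [PySem.Dict.keys_empty, PySem.Set.update_nil_left]

theorem A_inner_run (cy : String) (sl : List String) :
    ∀ (cls : List (String × List String)), (cls.map Prod.fst).Nodup →
    ∀ (acc₀ : PySem.Dict String (PySem.Dict String (List String)))
      (d : PySem.Dict String (List String)),
      (∀ c ∈ cls.map Prod.fst, d.contains c = false) →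
      cls.foldl (stepA cy sl) (acc₀.insert cy d)
        = acc₀.insert cy (PySem.Dict.mk (d.items ++ LA cls sl)) := by
  intro cls
  induction cls with
  | nil =>
    intro _ acc₀ d _
    simp only [List.foldl_nil, LA, List.filter_nil, List.map_nil, List.append_nil]
  | cons p rest ih =>
    intro hk acc₀ d hd
    simp only [List.map_cons, List.nodup_cons] at hk
    simp only [List.foldl_cons]
    by_cases hi : interA p.2 sl = []
    · have hstep : stepA cy sl (acc₀.insert cy d) p = acc₀.insert cy d := by
        simp [stepA, hi]
      rw [hstep, ih hk.2 acc₀ d (fun c hc => hd c (by simp only [List.map_cons, List.mem_cons]; exact Or.inr hc))]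
      have hLA : LA (p :: rest) sl = LA rest sl := by
        simp [LA, hi]
      rw [hLA]
    · have hstep : stepA cy sl (acc₀.insert cy d) p
          = acc₀.insert cy (d.insert p.1 (interA p.2 sl)) := by
        simp only [stepA, hi, ne_eq, not_false_eq_true, if_true,
          PySem.Dict.contains_insert_self, PySem.Dict.getD_insert_self,
          PySem.Dict.insert_insert_self]
      rw [hstep]
      have hdp : d.contains p.1 = false := hd p.1 (by simp)
      have hd' : ∀ c ∈ rest.map Prod.fst, (d.insert p.1 (interA p.2 sl)).contains c = false := by
        intro c hc
        rw [PySem.Dict.contains_insert]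
        have hne : c ≠ p.1 := fun h => hk.1 (h ▸ hc)
        simp [hne, hd c (by simp only [List.map_cons, List.mem_cons]; exact Or.inr hc)]
      rw [ih hk.2 acc₀ _ hd']
      have hitems : (d.insert p.1 (interA p.2 sl)).items = d.items ++ [(p.1, interA p.2 sl)] :=
        PySem.Dict.items_insert_of_not_contains d _ hdp
      have hLA : LA (p :: rest) sl = (p.1, interA p.2 sl) :: LA rest sl := by
        simp [LA, hi]
      rw [hitems, hLA, List.append_assoc]
      rfl

theorem A_inner (cy : String) (sl : List String) (cls : List (String × List String))
    (hk : (cls.map Prod.fst).Nodup) (acc : PySem.Dict String (PySem.Dict String (List String)))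
    (hacc : acc.contains cy = false) :
    cls.foldl (stepA cy sl) acc
      = if LA cls sl = [] then acc else acc.insert cy (PySem.Dict.mk (LA cls sl)) := by
  induction cls with
  | nil => simp [LA]
  | cons p rest ih =>
    simp only [List.map_cons, List.nodup_cons] at hk
    simp only [List.foldl_cons]
    by_cases hi : interA p.2 sl = []
    · have hstep : stepA cy sl acc p = acc := by simp [stepA, hi]
      have hLA : LA (p :: rest) sl = LA rest sl := by simp [LA, hi]
      rw [hstep, hLA]
      exact ih hk.2
    · have hstep : stepA cy sl acc p
          = acc.insert cy ((PySem.Dict.empty).insert p.1 (interA p.2 sl)) := by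
      -- acc does not contain cy: a fresh inner dict is created, then {classroom: intersection} set
        simp only [stepA, hi, ne_eq, not_false_eq_true, if_true, hacc, Bool.false_eq_true,
          if_false, PySem.Dict.getD_insert_self, PySem.Dict.insert_insert_self]
      rw [hstep]
      have hd0 : ∀ c ∈ rest.map Prod.fst,
          ((PySem.Dict.empty : PySem.Dict String (List String)).insert p.1
            (interA p.2 sl)).contains c = false := by
        intro c hc
        rw [PySem.Dict.contains_insert]
        have hne : c ≠ p.1 := fun h => hk.1 (h ▸ hc)
        simp [hne, PySem.Dict.contains_empty]
      rw [A_inner_run cy sl rest hk.2 acc _ hd0]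
      have hitems : ((PySem.Dict.empty : PySem.Dict String (List String)).insert p.1
          (interA p.2 sl)).items = [(p.1, interA p.2 sl)] :=
        PySem.Dict.items_insert_of_not_contains _ _ (PySem.Dict.contains_empty _)
      have hLA : LA (p :: rest) sl = (p.1, interA p.2 sl) :: LA rest sl := by
        simp [LA, hi]
      rw [hitems, hLA]
      simp

theorem A_outer (cls : List (String × List String)) (hk : (cls.map Prod.fst).Nodup) :
    ∀ (yrs : List (String × List String)) (acc : PySem.Dict String (PySem.Dict String (List String))),
      (yrs.map Prod.fst).Nodup → (∀ q ∈ yrs, acc.contains q.1 = false) →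
      yrs.foldl (fun acc q => cls.foldl (stepA q.1 q.2) acc) acc
        = yrs.foldl
            (fun res q =>
              if LA cls q.2 = [] then res else res.insert q.1 (PySem.Dict.mk (LA cls q.2)))
            acc := by
  intro yrs
  induction yrs with
  | nil => intro acc _ _; rfl
  | cons q rest ih =>
    intro acc hnd hacc
    simp only [List.map_cons, List.nodup_cons] at hnd
    simp only [List.foldl_cons]
    rw [A_inner q.1 q.2 cls hk acc (hacc q List.mem_cons_self)]
    by_cases hq : LA cls q.2 = []
    · rw [if_pos hq]
      exact ih acc hnd.2 (fun q' hq' => hacc q' (List.mem_cons_of_mem q hq'))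
    · rw [if_neg hq]
      refine ih _ hnd.2 ?_
      intro q' hq'
      rw [PySem.Dict.contains_insert]
      have hne : q'.1 ≠ q.1 := by
        intro h
        exact hnd.1 (h ▸ List.mem_map_of_mem hq')
      simp [hne, hacc q' (List.mem_cons_of_mem q hq')]

theorem index_getD_nodup (cls : List (String × List String))
    (hk : (cls.map Prod.fst).Nodup) (s : String) : ((invIndex cls).getD s []).Nodup := by
  rw [invIndex_getD]
  exact List.Nodup.sublist (List.Sublist.map _ List.filter_sublist) hk

theorem mem_invIndex (cls : List (String × List String)) (s c : String) :
    c ∈ (invIndex cls).getD s [] ↔ ∃ p, p ∈ cls ∧ p.1 = c ∧ s ∈ p.2 := by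
  rw [invIndex_getD]
  simp only [List.mem_map, List.mem_filter, decide_eq_true_eq]
  constructor
  · rintro ⟨p, ⟨hp, hs⟩, rfl⟩; exact ⟨p, hp, rfl, hs⟩
  · rintro ⟨p, hp, rfl, hs⟩; exact ⟨p, ⟨hp, hs⟩, rfl⟩

theorem mem_invIndex_pair (cls : List (String × List String))
    (hk : (cls.map Prod.fst).Nodup) {p : String × List String} (hp : p ∈ cls) (s : String) :
    p.1 ∈ (invIndex cls).getD s [] ↔ s ∈ p.2 := by
  rw [mem_invIndex]
  constructor
  · rintro ⟨p', hp', he, hs⟩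
    have : p' = p := List.inj_on_of_nodup_map hk hp' hp he
    exact this ▸ hs
  · intro hs; exact ⟨p, hp, rfl, hs⟩

theorem interA_ne_nil (studs sl : List String) :
    interA studs sl ≠ [] ↔ ∃ x, x ∈ studs ∧ x ∈ sl := by
  unfold interA
  rw [ne_eq, PySem.List.sorted_eq_nil_iff]
  simp only [PySem.Set.inter, PySem.Set.contains, ← ne_eq, ← List.isEmpty_eq_false_iff,
    List.isEmpty_eq_false_iff_exists_mem, List.mem_filter, List.contains_iff_mem,
    PySem.Set.mem_ofList]

theorem grouped_getD_pair (cls : List (String × List String))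
    (hk : (cls.map Prod.fst).Nodup) (sl : List String) {p : String × List String} (hp : p ∈ cls) :
    (groupedB (invIndex cls) sl).getD p.1 []
      = (PySem.List.dedup sl).filter (fun s => decide (s ∈ p.2)) := by
  rw [groupedB_getD _ (fun t => index_getD_nodup cls hk t) sl]
  refine List.filter_congr (fun s _ => ?_)
  simp only [decide_eq_decide]
  exact mem_invIndex_pair cls hk hp s

theorem grouped_contains_iff (cls : List (String × List String)) (sl : List String) (c : String) :
    (groupedB (invIndex cls) sl).contains c = true
      ↔ ∃ s, s ∈ sl ∧ c ∈ (invIndex cls).getD s [] := by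
  rw [PySem.Dict.contains_eq_decide_mem_keys, groupedB_keys, decide_eq_true_eq,
    PySem.Set.mem_ofList]
  simp only [List.mem_map, List.mem_flatMap, PySem.List.mem_dedup]
  constructor
  · rintro ⟨pr, ⟨s, hs, ⟨c', hc', he⟩⟩, rfl⟩
    cases he
    exact ⟨s, hs, hc'⟩
  · rintro ⟨s, hs, hc⟩
    exact ⟨(c, s), ⟨s, hs, ⟨c, hc, rfl⟩⟩, rfl⟩

theorem grouped_contains_pair (cls : List (String × List String))
    (hk : (cls.map Prod.fst).Nodup) (sl : List String) {p : String × List String} (hp : p ∈ cls) :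
    (groupedB (invIndex cls) sl).contains p.1 = decide (interA p.2 sl ≠ []) := by
  by_cases hc : (groupedB (invIndex cls) sl).contains p.1 = true
  · rw [hc]
    symm; rw [decide_eq_true_eq]
    obtain ⟨s, hs, hm⟩ := (grouped_contains_iff cls sl p.1).mp hc
    exact (interA_ne_nil p.2 sl).mpr ⟨s, (mem_invIndex_pair cls hk hp s).mp hm, hs⟩
  · rw [Bool.not_eq_true] at hc
    rw [hc]
    symm; rw [decide_eq_false_iff_not]
    intro hne
    obtain ⟨x, hx2, hxsl⟩ := (interA_ne_nil p.2 sl).mp hne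
    rw [Bool.eq_false_iff] at hc
    exact hc ((grouped_contains_iff cls sl p.1).mpr
      ⟨x, hxsl, (mem_invIndex_pair cls hk hp x).mpr hx2⟩)

theorem grouped_value_pair (cls : List (String × List String))
    (hk : (cls.map Prod.fst).Nodup) (sl : List String) {p : String × List String} (hp : p ∈ cls) :
    PySem.List.sorted ((groupedB (invIndex cls) sl).getD p.1 []) (fun x => x)
      = interA p.2 sl := by
  rw [grouped_getD_pair cls hk sl hp]
  unfold interA
  apply PySem.List.sorted_eq_sorted_of_perm _ _ _ (fun a b h => h)
  rw [List.perm_ext_iff_of_nodup ((PySem.List.nodup_dedup sl).filter _)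
    (PySem.Set.nodup_inter _ _ (PySem.Set.nodup_ofList p.2))]
  intro x
  simp [List.mem_filter, PySem.Set.inter, PySem.Set.contains, PySem.Set.mem_ofList]
  tauto

theorem grouped_items_ne_nil (cls : List (String × List String))
    (hk : (cls.map Prod.fst).Nodup) (sl : List String) :
    ((groupedB (invIndex cls) sl).items ≠ []) ↔ LA cls sl ≠ [] := by
  have hkeys : (groupedB (invIndex cls) sl).items ≠ []
      ↔ ∃ c, (groupedB (invIndex cls) sl).contains c = true := by
    rw [← List.isEmpty_eq_false_iff, List.isEmpty_eq_false_iff_exists_mem]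
    constructor
    · rintro ⟨pr, hpr⟩
      refine ⟨pr.1, ?_⟩
      rw [PySem.Dict.contains_eq_decide_mem_keys, decide_eq_true_eq, PySem.Dict.keys.eq_1]
      exact List.mem_map_of_mem hpr
    · rintro ⟨c, hc⟩
      rw [PySem.Dict.contains_eq_decide_mem_keys, decide_eq_true_eq, PySem.Dict.keys.eq_1] at hc
      rcases List.mem_map.mp hc with ⟨pr, hpr, _⟩
      exact ⟨pr, hpr⟩
  have hLA : LA cls sl ≠ [] ↔ ∃ p, p ∈ cls ∧ interA p.2 sl ≠ [] := by
    unfold LA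
    rw [ne_eq, List.map_eq_nil_iff, ← ne_eq, ← List.isEmpty_eq_false_iff,
      List.isEmpty_eq_false_iff_exists_mem]
    constructor
    · rintro ⟨p, hp⟩
      rcases List.mem_filter.mp hp with ⟨hp1, hp2⟩
      exact ⟨p, hp1, of_decide_eq_true hp2⟩
    · rintro ⟨p, hp, hne⟩
      exact ⟨p, List.mem_filter.mpr ⟨hp, decide_eq_true hne⟩⟩
  rw [hkeys, hLA]
  constructor
  · rintro ⟨c, hc⟩
    obtain ⟨s, hs, hm⟩ := (grouped_contains_iff cls sl c).mp hc
    obtain ⟨p, hp, _, hsp⟩ := (mem_invIndex cls s c).mp hm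
    exact ⟨p, hp, (interA_ne_nil p.2 sl).mpr ⟨s, hsp, hs⟩⟩
  · rintro ⟨p, hp, hne⟩
    obtain ⟨x, hx2, hxsl⟩ := (interA_ne_nil p.2 sl).mp hne
    exact ⟨p.1, (grouped_contains_iff cls sl p.1).mpr
      ⟨x, hxsl, (mem_invIndex_pair cls hk hp x).mpr hx2⟩⟩

theorem blk_eq (cls : List (String × List String))
    (hk : (cls.map Prod.fst).Nodup) (sl : List String) :
    (cls.map (fun p => p.1)).foldl
        (fun d c =>
          if (groupedB (invIndex cls) sl).contains c then
            d.insert c (PySem.List.sorted ((groupedB (invIndex cls) sl).getD c []) (fun x => x))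
          else d)
        PySem.Dict.empty
      = PySem.Dict.mk (LA cls sl) := by
  rw [List.foldl_map, ← List.foldl_filter]
  apply PySem.Dict.ext
  have hfresh := PySem.Dict.items_foldl_insert_fresh
      (cls.filter (fun y => (groupedB (invIndex cls) sl).contains y.1))
      (fun p => p.1)
      (fun p => PySem.List.sorted ((groupedB (invIndex cls) sl).getD p.1 []) (fun x => x))
      PySem.Dict.empty
      (fun a _ => PySem.Dict.contains_empty _)
      (List.Nodup.sublist (List.Sublist.map _ List.filter_sublist) hk)
  rw [hfresh]
  rw [show (PySem.Dict.empty : PySem.Dict String (List String)).items = [] from rfl,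
    List.nil_append]
  show _ = LA cls sl
  unfold LA
  rw [List.filter_congr (fun p hp => grouped_contains_pair cls hk sl hp)]
  exact List.map_congr_left (fun p hp =>
    congrArg (Prod.mk p.1) (grouped_value_pair cls hk sl (List.mem_filter.mp hp).1))

-- ===== VERDICT (by name: the statement is the Claim_ definition above) =====
theorem print_classroom_details_spec : Claim_equal_print_classroom_details := by
  intro cc syl _
  unfold Spec_print_classroom_details
  simp only [print_classroom_details, print_classroom_details_alt]
  have hkc : (((PySem.Dict.ofList cc : PySem.Dict String (List String)).items.map Prod.fst)).Nodup :=
    PySem.Dict.nodup_keys_ofList cc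
  have hky : (((PySem.Dict.ofList syl : PySem.Dict String (List String)).items.map Prod.fst)).Nodup :=
    PySem.Dict.nodup_keys_ofList syl
  rw [A_outer _ hkc _ _ hky (fun q _ => PySem.Dict.contains_empty _)]
  congr 1
  show PySem.Dict.items _ = PySem.Dict.items _
  congr 1
  apply PySem.List.foldl_congr_mem
  intro acc q _
  by_cases hcond : LA (PySem.Dict.ofList cc).items q.2 = []
  · rw [if_pos hcond]
    have hitems : (groupedB (invIndex (PySem.Dict.ofList cc).items) q.2).items = [] := by
      by_contra h
      exact (grouped_items_ne_nil _ hkc q.2).mp h hcond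
    simp only [hitems, ne_eq, not_true_eq_false, if_false]
  · rw [if_neg hcond]
    have hitems : (groupedB (invIndex (PySem.Dict.ofList cc).items) q.2).items ≠ [] :=
      (grouped_items_ne_nil _ hkc q.2).mpr hcond
    simp only [ne_eq, hitems, not_false_eq_true, if_true]
    congr 1
    rw [show (PySem.Dict.ofList cc : PySem.Dict String (List String)).keys
        = (PySem.Dict.ofList cc : PySem.Dict String (List String)).items.map (fun p => p.1)
      from PySem.Dict.keys.eq_1 _]
    exact (blk_eq _ hkc q.2).symm
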